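-- pv_equiv track=rewrite | github.com/eeehs/Algorism | 프로그래머스/lv0/120846. 합성수 찾기/합성수 찾기.py | solution
-- ===== SOURCE A (Python) =====
-- def solution(n):
--     answer = 0
--     count = 0
--     for i in range(4, n+1):
--         for m in range(1, 101):
--             if i >= m and i % m == 0:
--                 count += 1
--         if count >= 3:
--             count = 0
--             answer += 1
--     return answer
-- ===== SOURCE B (Python) =====
-- def solution(n):
--     # B: sieve divisor counts (divisors 1..100) over multiples, then one pass
--     # replicating A's cumulative count/reset logic.
--     d = [0] * max(n + 1, 0)
--     for m in range(1, 101):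
--         for j in range(m, n + 1, m):
--             d[j] += 1
--     answer = 0
--     count = 0
--     for i in range(4, n + 1):
--         count += d[i]
--         if count >= 3:
--             answer += 1
--             count = 0
--     return answer
-- ===== Notes on version B (the rewrite author's own statement) =====
-- stated objective: faster
-- what changed: Replaces A's inner 100-iteration divisibility loop per i by a single divisor-count sieve over multiples (for each m in 1..100, one pass over its multiples up to n), followed by the same one cumulative count/reset pass.
import Mathlib
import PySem

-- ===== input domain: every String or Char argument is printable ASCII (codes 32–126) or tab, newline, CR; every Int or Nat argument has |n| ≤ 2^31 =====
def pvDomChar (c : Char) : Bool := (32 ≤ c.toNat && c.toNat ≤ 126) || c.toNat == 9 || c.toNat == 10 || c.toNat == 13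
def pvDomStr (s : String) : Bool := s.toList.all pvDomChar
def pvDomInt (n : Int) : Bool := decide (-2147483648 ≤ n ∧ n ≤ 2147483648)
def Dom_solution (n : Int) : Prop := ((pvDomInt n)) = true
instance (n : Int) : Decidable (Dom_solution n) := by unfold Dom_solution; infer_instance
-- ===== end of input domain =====

-- B replaces A's 100-test inner loop per i by a divisor-count sieve over multiples
-- plus the same single cumulative pass (objective: faster, constant factor).

-- ===== PORT A =====
-- literal transliteration of A: for i in 4..n, inner loop m in 1..100 accumulating
-- into the carried `count`, reset + answer increment when count >= 3
def solution (n : Int) : Int :=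
  ((PySem.List.pyRange 4 (n + 1) 1).foldl
    (fun (s : Int × Int) i =>
      let count := (PySem.List.pyRange 1 101 1).foldl
        (fun c m => if i ≥ m ∧ PySem.Int.mod i m = 0 then c + 1 else c) s.2
      if count ≥ 3 then (s.1 + 1, 0) else (s.1, count))
    (0, 0)).1

-- ===== PORT B =====
-- literal transliteration of Source B: sieve list d of length max(n+1,0) (toNat clamps
-- at 0 exactly like max(n+1, 0)), then the single cumulative pass over 4..n.
def solution_alt (n : Int) : Int :=
  let d := (PySem.List.pyRange 1 101 1).foldl
    (fun d m => (PySem.List.pyRange m (n + 1) m).foldl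
      (fun d j => PySem.List.pySetD d j (PySem.List.pyGetD d j 0 + 1)) d)
    (List.replicate (n + 1).toNat (0 : Int))
  ((PySem.List.pyRange 4 (n + 1) 1).foldl
    (fun (s : Int × Int) i =>
      let count := s.2 + PySem.List.pyGetD d i 0
      if count ≥ 3 then (s.1 + 1, 0) else (s.1, count))
    (0, 0)).1

-- ===== PRECONDITION & SPEC =====
def Spec_solution (n : Int) (out : Int) : Prop := out = solution_alt n
instance (n : Int) (out : Int) : Decidable (Spec_solution n out) := by unfold Spec_solution; infer_instance

-- ===== CLAIM (what is proved, stated in full; the proofs are below) =====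
def Claim_equal_solution : Prop := ∀ (n : Int), Dom_solution n → Spec_solution n (solution n)

-- ===== LEMMAS AND PROOFS =====

-- the number of m in 1..100 dividing i (with m ≤ i), as A's inner loop counts it
def cnt (i : Int) : Int :=
  ((PySem.List.pyRange 1 101 1).countP (fun m => decide (i ≥ m ∧ PySem.Int.mod i m = 0)) : Nat)

-- A's inner loop starting from c equals c + cnt i
lemma innerA_eq (i c : Int) :
    (PySem.List.pyRange 1 101 1).foldl
      (fun c m => if i ≥ m ∧ PySem.Int.mod i m = 0 then c + 1 else c) c = c + cnt i := by
  have h : ∀ (acc : Int), ∀ m ∈ PySem.List.pyRange 1 101 1,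
      (if i ≥ m ∧ PySem.Int.mod i m = 0 then acc + 1 else acc)
        = (if (fun m => decide (i ≥ m ∧ PySem.Int.mod i m = 0)) m = true then acc + 1 else acc) := by
    intro acc m _; simp
  rw [PySem.List.foldl_congr_mem _ _ _ _ h,
      PySem.List.foldl_count_if (fun m => decide (i ≥ m ∧ PySem.Int.mod i m = 0))]
  rfl

-- increment-at-index fold: each distinct nonnegative index gets +1 when in range
lemma getD_foldl_inc (js : List Int) (hpos : ∀ j ∈ js, (0:Int) ≤ j) (hnd : js.Nodup)
    (d : List Int) (i : Nat) :
    (js.foldl (fun d j => d.set j.toNat (d.getD j.toNat 0 + 1)) d).getD i 0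
      = d.getD i 0 + (if (i : Int) ∈ js ∧ i < d.length then 1 else 0) := by
  induction js generalizing d with
  | nil => simp
  | cons j t ih =>
    have hj0 : (0:Int) ≤ j := hpos j (List.mem_cons_self)
    have hjt : j ∉ t := (List.nodup_cons.mp hnd).1
    simp only [List.foldl_cons]
    rw [ih (fun x hx => hpos x (List.mem_cons_of_mem _ hx)) (List.nodup_cons.mp hnd).2]
    have hlen : (d.set j.toNat (d.getD j.toNat 0 + 1)).length = d.length := by simp
    rw [hlen]
    by_cases hij : (i : Int) = j
    · have hji : j.toNat = i := by omega
      have hnt : (i : Int) ∉ t := by rw [hij]; exact hjt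
      by_cases hlt : i < d.length
      · have hv : (d.set j.toNat (d.getD j.toNat 0 + 1)).getD i 0 = d.getD i 0 + 1 := by
          rw [hji, List.getD_eq_getElem?_getD, List.getElem?_set_self (by omega : i < d.length)]
          simp [List.getD_eq_getElem?_getD, List.getElem?_eq_getElem hlt]
        have hmem : (i : Int) ∈ j :: t := by simp [hij]
        rw [hv]
        simp [hmem, hnt, hlt]
      · have hv : (d.set j.toNat (d.getD j.toNat 0 + 1)).getD i 0 = d.getD i 0 := by
          rw [List.getD_eq_default _ _ (by omega : (d.set j.toNat (d.getD j.toNat 0 + 1)).length ≤ i),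
              List.getD_eq_default _ _ (by omega : d.length ≤ i)]
        rw [hv]
        simp [hnt, hlt]
    · have hij' : j.toNat ≠ i := by omega
      have hv : (d.set j.toNat (d.getD j.toNat 0 + 1)).getD i 0 = d.getD i 0 := by
        rw [List.getD_eq_getElem?_getD, List.getElem?_set_ne hij', ← List.getD_eq_getElem?_getD]
      rw [hv]
      by_cases hm : (i : Int) ∈ t
      · simp [hm, hij]
      · simp [hm, hij, List.mem_cons]

-- pyRange with positive step has no duplicates
lemma nodup_pyRange_pos (a b s : Int) (hs : 0 < s) : (PySem.List.pyRange a b s).Nodup := by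
  rw [PySem.List.pyRange_of_pos a b hs]
  refine List.Nodup.map ?_ (List.nodup_range)
  intro x y hxy
  have h1 : s * (x : Int) = s * (y : Int) := by linarith [hxy]
  have h2 : (x : Int) = y := mul_left_cancel₀ (by omega : s ≠ 0) h1
  exact_mod_cast h2

-- the inner sieve pass preserves the list length
lemma length_sieve_inner (js : List Int) (d : List Int) :
    (js.foldl (fun d j => PySem.List.pySetD d j (PySem.List.pyGetD d j 0 + 1)) d).length
      = d.length := by
  induction js generalizing d with
  | nil => rfl
  | cons j u ih => simp only [List.foldl_cons]; rw [ih]; simp [PySem.List.length_pySetD]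

-- one sieve pass for divisor m adds 1 at exactly the multiples of m in [m, n]
lemma sieve_step (n m : Int) (hm : 1 ≤ m) (d : List Int) (i : Int) (hi : 1 ≤ i) :
    ((PySem.List.pyRange m (n + 1) m).foldl
      (fun d j => PySem.List.pySetD d j (PySem.List.pyGetD d j 0 + 1)) d).getD i.toNat 0
      = d.getD i.toNat 0
        + (if i ∈ PySem.List.pyRange m (n + 1) m ∧ i.toNat < d.length then 1 else 0) := by
  have hmem : ∀ j ∈ PySem.List.pyRange m (n + 1) m, (0 : Int) ≤ j := by
    intro j hj
    have := (PySem.List.mem_pyRange_iff_of_pos (by omega) j).mp hj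
    omega
  have hcongr : ∀ (acc : List Int), ∀ j ∈ PySem.List.pyRange m (n + 1) m,
      PySem.List.pySetD acc j (PySem.List.pyGetD acc j 0 + 1)
        = acc.set j.toNat (acc.getD j.toNat 0 + 1) := by
    intro acc j hj
    rw [PySem.List.pyGetD_of_nonneg acc 0 (hmem j hj), PySem.List.pySetD_of_nonneg acc _ (hmem j hj)]
  rw [PySem.List.foldl_congr_mem _ _ _ _ hcongr]
  rw [getD_foldl_inc _ hmem (nodup_pyRange_pos m (n + 1) m (by omega)) d i.toNat]
  rw [Int.toNat_of_nonneg (by omega : (0:Int) ≤ i)]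

-- folding the sieve over any list of divisors ≥ 1 accumulates A's inner count
lemma sieve_fold (n : Int) (ms : List Int) (hms : ∀ m ∈ ms, 1 ≤ m)
    (d : List Int) (hd : d.length = (n + 1).toNat) (i : Int) (hi : 1 ≤ i) (hin : i ≤ n) :
    ((ms.foldl
      (fun d m => (PySem.List.pyRange m (n + 1) m).foldl
        (fun d j => PySem.List.pySetD d j (PySem.List.pyGetD d j 0 + 1)) d) d)).getD i.toNat 0
      = d.getD i.toNat 0 + (ms.countP (fun m => decide (i ≥ m ∧ PySem.Int.mod i m = 0)) : Nat) := by
  induction ms generalizing d with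
  | nil => simp
  | cons m t ih =>
    have hm : 1 ≤ m := hms m (List.mem_cons_self)
    simp only [List.foldl_cons]
    have hlen := length_sieve_inner (PySem.List.pyRange m (n + 1) m) d
    rw [ih (fun m hm => hms m (List.mem_cons_of_mem _ hm)) _ (by rw [hlen]; exact hd)]
    rw [sieve_step n m hm d i hi]
    have hrange : i.toNat < d.length := by omega
    have hmemiff : i ∈ PySem.List.pyRange m (n + 1) m ↔ (i ≥ m ∧ PySem.Int.mod i m = 0) := by
      rw [PySem.List.mem_pyRange_iff_of_pos (by omega), PySem.Int.mod_eq_zero_iff_dvd]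
      constructor
      · rintro ⟨h1, _, hdvd⟩
        exact ⟨h1, by simpa using dvd_add hdvd (dvd_refl m)⟩
      · rintro ⟨hge, hdvd⟩
        exact ⟨hge, by omega, dvd_sub hdvd (dvd_refl m)⟩
    rw [List.countP_cons]
    by_cases hc : i ≥ m ∧ PySem.Int.mod i m = 0
    · simp only [hmemiff, hc, hrange, and_true, if_true]
      simp
      ring
    · simp only [hmemiff]
      simp [hc]

-- the sieve value at i equals cnt i, for 1 ≤ i ≤ n
lemma sieve_value (n i : Int) (hi : 1 ≤ i) (hin : i ≤ n) :
    ((PySem.List.pyRange 1 101 1).foldl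
      (fun d m => (PySem.List.pyRange m (n + 1) m).foldl
        (fun d j => PySem.List.pySetD d j (PySem.List.pyGetD d j 0 + 1)) d)
      (List.replicate (n + 1).toNat (0 : Int))).getD i.toNat 0 = cnt i := by
  rw [sieve_fold n _ (fun m hm => (PySem.List.mem_pyRange_one.mp hm).1)
      _ (by simp) i hi hin]
  simp [cnt, List.getD_eq_getElem?_getD]

-- ===== VERDICT (by name: the statement is the Claim_ definition above) =====
theorem solution_spec : Claim_equal_solution := by
  intro n _
  unfold Spec_solution solution solution_alt
  refine congrArg Prod.fst ?_
  apply PySem.List.foldl_congr_mem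
  intro s i hi
  have hib := PySem.List.mem_pyRange_one.mp hi
  simp only
  rw [innerA_eq]
  rw [PySem.List.pyGetD_of_nonneg _ 0 (by omega : (0:Int) ≤ i)]
  rw [sieve_value n i (by omega) (by omega)]
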